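-- pv_equiv track=rewrite | github.com/dciborow/gpt-review | src/gpt_review/repositories/_devops.py | _get_condensed_patch
-- ===== SOURCE A (Python) =====
-- from typing import Dict, Iterator, List, Optional, Iterable
--
-- SURROUNDING_CONTEXT = 5
--
-- def _get_condensed_patch(patch: List[str]) -> List[str]:
--     buffer = []
--     result = []
--     trailing_context = 0
--
--     for line in patch:
--         if line.startswith("+") or line.startswith("-"):
--             result.extend(buffer[-SURROUNDING_CONTEXT:])
--             buffer.clear()
--             result.append(line)
--             trailing_context = SURROUNDING_CONTEXT
--         elif trailing_context > 0:
--             result.append(line)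
--             trailing_context -= 1
--         else:
--             buffer.append(line)
--
--     return result
-- ===== SOURCE B (Python) =====
-- SURROUNDING_CONTEXT = 5
--
-- def _get_condensed_patch(patch):
--     n = len(patch)
--     changed = [line.startswith("+") or line.startswith("-") for line in patch]
--     keep = []
--     for i in range(n):
--         lo = max(0, i - SURROUNDING_CONTEXT)
--         hi = min(n, i + SURROUNDING_CONTEXT + 1)
--         keep.append(any(changed[j] for j in range(lo, hi)))
--     return [patch[i] for i in range(n) if keep[i]]
-- ===== Notes on version B (the rewrite author's own statement) =====
-- stated objective: alternative
-- what changed: Replaces A's stateful streaming pass (pre-context buffer, flush on change, trailing-context countdown) by a stateless two-pass mask: mark change lines, keep exactly the lines within SURROUNDING_CONTEXT of some change, then filter.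
import Mathlib
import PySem

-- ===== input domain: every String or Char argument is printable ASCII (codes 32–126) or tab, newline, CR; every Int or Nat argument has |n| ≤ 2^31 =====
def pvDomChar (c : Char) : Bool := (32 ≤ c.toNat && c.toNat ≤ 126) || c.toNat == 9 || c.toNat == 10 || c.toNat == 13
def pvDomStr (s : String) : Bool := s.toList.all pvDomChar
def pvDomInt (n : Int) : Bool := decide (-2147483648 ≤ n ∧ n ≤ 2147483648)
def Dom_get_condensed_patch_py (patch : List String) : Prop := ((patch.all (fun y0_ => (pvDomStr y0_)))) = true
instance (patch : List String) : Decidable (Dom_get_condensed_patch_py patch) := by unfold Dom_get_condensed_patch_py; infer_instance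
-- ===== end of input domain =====

-- B replaces A's stateful streaming pass (buffer/flush/trailing countdown) by a stateless
-- two-pass window mask: keep exactly the lines within 5 positions of a '+'/'-' line.

-- ===== PORT A =====
-- line.startswith("+") or line.startswith("-")
def pvIsChange (line : String) : Bool :=
  PySem.Str.startswith line "+" || PySem.Str.startswith line "-"

-- loop body of A: state = (buffer, result, trailing_context)
def pvStepA (st : List String × List String × Int) (line : String) :
    List String × List String × Int :=
  if pvIsChange line then
    ([], st.2.1 ++ PySem.List.slice st.1 (some (-5)) none ++ [line], 5)
  else if st.2.2 > 0 then
    (st.1, st.2.1 ++ [line], st.2.2 - 1)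
  else
    (st.1 ++ [line], st.2.1, st.2.2)

def get_condensed_patch_py (patch : List String) : List String :=
  (patch.foldl pvStepA ([], [], 0)).2.1

-- ===== PORT B =====
-- two passes: a boolean change list, then a keep-mask (any change within the clipped
-- symmetric window [i-5, i+5]), then a filter.  Nat subtraction i - 5 = max(0, i-5) and
-- List.range' lo (hi - lo) = range(lo, hi) exactly (lo ≤ hi here); patch.getD i "" = patch[i] for i < n.
def get_condensed_patch_py_alt (patch : List String) : List String :=
  let n := patch.length
  let changed := patch.map (fun line => pvIsChange line)
  let keep := (List.range n).map (fun i =>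
    (List.range' (i - 5) (min n (i + 6) - (i - 5))).any (fun j => changed.getD j false))
  ((List.range n).filter (fun i => keep.getD i false)).map (fun i => patch.getD i "")

-- ===== PRECONDITION & SPEC =====
def Spec_get_condensed_patch_py (patch : List String) (out : List String) : Prop := out = get_condensed_patch_py_alt patch
instance (patch : List String) (out : List String) : Decidable (Spec_get_condensed_patch_py patch out) := by unfold Spec_get_condensed_patch_py; infer_instance

-- ===== CLAIM (what is proved, stated in full; the proofs are below) =====
def Claim_equal_get_condensed_patch_py : Prop := ∀ (patch : List String), Dom_get_condensed_patch_py patch → Spec_get_condensed_patch_py patch (get_condensed_patch_py patch)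

-- ===== LEMMAS AND PROOFS =====

-- A's loop, as a recursion over the remaining lines (buffer, trailing, rest)
def pvEmit : List String → Int → List String → List String
  | _, _, [] => []
  | buf, t, line :: rest =>
    if pvIsChange line then PySem.List.slice buf (some (-5)) none ++ line :: pvEmit [] 5 rest
    else if t > 0 then line :: pvEmit buf (t - 1) rest
    else pvEmit (buf ++ [line]) t rest

-- index of the first change line
def pvFc : List String → Option Nat
  | [] => none
  | x :: r => if pvIsChange x then some 0 else (pvFc r).map (· + 1)

-- last k elements
def pvLastN (k : Nat) (l : List String) : List String := l.drop (l.length - k)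

-- the part of the inherited buffer that the first change of l flushes
def pvFlush (buf : List String) (t : Nat) (l : List String) : List String :=
  match pvFc l with
  | none => []
  | some c => pvLastN (5 - (c - t)) buf

-- recursive form of the window filter
def pvMrec : Nat → List String → List String
  | _, [] => []
  | t, x :: rest =>
    if pvIsChange x then x :: pvMrec 5 rest
    else (if 0 < t || (rest.take 5).any pvIsChange then [x] else []) ++ pvMrec (t - 1) rest

def pvWindow (l : List String) (i : Nat) : Bool :=
  (List.range' (i - 5) (min l.length (i + 6) - (i - 5))).any (fun j => (l.map pvIsChange).getD j false)

def pvKeep (l : List String) (t : Nat) (i : Nat) : Bool := decide (i < t) || pvWindow l i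

-- filter form of B with an extra trailing parameter
def pvMfil (l : List String) (t : Nat) : List String :=
  ((List.range l.length).filter (fun i => pvKeep l t i)).map (fun i => l.getD i "")

theorem pvFoldl_emit (l : List String) (buf res : List String) (t : Int) :
    (l.foldl pvStepA (buf, res, t)).2.1 = res ++ pvEmit buf t l := by
  induction l generalizing buf res t with
  | nil => simp [pvEmit]
  | cons x rest ih =>
    simp only [List.foldl_cons, pvEmit, pvStepA]
    split_ifs with h1 h2 <;> simp [ih]


theorem pvFlush_nil (t : Nat) (l : List String) : pvFlush [] t l = [] := by
  unfold pvFlush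
  cases pvFc l <;> simp [pvLastN]


theorem pvFc_none_any (l : List String) (h : pvFc l = none) :
    ∀ y ∈ l, pvIsChange y = false := by
  induction l with
  | nil => simp
  | cons x r ih =>
    intro y hy
    unfold pvFc at h
    by_cases hx : pvIsChange x <;> simp [hx] at h
    rcases List.mem_cons.mp hy with rfl | hy
    · simpa using hx
    · exact ih h y hy


theorem pvFc_take_any (l : List String) (c : Nat) (h : pvFc l = some c) (k : Nat) :
    (l.take k).any pvIsChange = decide (c < k) := by
  induction l generalizing c k with
  | nil => simp [pvFc] at h
  | cons x r ih =>
    unfold pvFc at h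
    by_cases hx : pvIsChange x <;> simp [hx] at h
    · subst h
      cases k with
      | zero => simp
      | succ k => simp [hx]
    · obtain ⟨c', hc', rfl⟩ := h
      cases k with
      | zero => simp
      | succ k =>
        simp only [List.take_succ_cons, List.any_cons, hx, Bool.false_or, ih c' hc' k]
        simp only [decide_eq_decide]
        omega


theorem pvLastN_append (buf : List String) (x : String) (c : Nat) :
    pvLastN (5 - c) (buf ++ [x]) = pvLastN (5 - (c + 1)) buf ++ (if c < 5 then [x] else []) := by
  unfold pvLastN
  by_cases hc : c < 5
  · rw [if_pos hc, List.length_append,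
      show buf.length + [x].length - (5 - c) = buf.length - (5 - (c + 1)) from by simp; omega]
    exact List.drop_append_of_le_length (Nat.sub_le _ _)
  · rw [if_neg hc, show 5 - c = 0 from by omega, show 5 - (c + 1) = 0 from by omega]
    simp [List.drop_length]

theorem pvEmit_eq (l : List String) (buf : List String) (t : Nat) (ht : t ≤ 5)
    (hbt : 0 < t → buf = []) :
    pvEmit buf (t : Int) l = pvFlush buf t l ++ pvMrec t l := by
  induction l generalizing buf t with
  | nil => simp [pvEmit, pvFlush, pvFc, pvMrec]
  | cons x rest ih =>
    by_cases hx : pvIsChange x = true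
    · have hfc : pvFc (x :: rest) = some 0 := by simp [pvFc, hx]
      have ih5 := ih [] 5 (by omega) (by simp)
      rw [show ((5 : Nat) : Int) = (5 : Int) from by norm_num] at ih5
      simp only [pvEmit, hx, if_pos, ih5, pvFlush_nil, List.nil_append]
      rw [PySem.List.slice_from_neg_ofNat buf 5 (by omega)]
      unfold pvFlush
      rw [hfc]
      simp only [pvMrec, hx, if_pos, show (5 : Nat) - (0 - t) = 5 from by omega]
      rfl
    · simp only [Bool.not_eq_true] at hx
      by_cases hlt : 0 < t
      · have hb : buf = [] := hbt hlt
        subst hb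
        have hpos : ((t : Nat) : Int) > 0 := by exact_mod_cast hlt
        have hcast : ((t : Nat) : Int) - 1 = (((t - 1 : Nat)) : Int) := by omega
        have ihr := ih [] (t - 1) (by omega) (by simp)
        simp only [pvEmit, hx, Bool.false_eq_true, if_false, if_pos hpos, hcast, ihr,
          pvFlush_nil, List.nil_append, pvMrec, hlt, decide_true,
          Bool.true_or, if_pos, List.nil_append]
        rfl
      · have ht0 : t = 0 := by omega
        subst ht0
        have ihr := ih (buf ++ [x]) 0 (by omega) (by omega)
        rw [show ((0 : Nat) : Int) = (0 : Int) from rfl] at ihr ⊢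
        simp only [pvEmit, hx, Bool.false_eq_true, if_false, gt_iff_lt, lt_irrefl, ihr]
        cases hfc : pvFc rest with
        | none =>
          have h5 : (rest.take 5).any pvIsChange = false := by
            rw [List.any_eq_false]
            intro y hy
            simp [pvFc_none_any rest hfc y (List.mem_of_mem_take hy)]
          unfold pvFlush
          simp [pvFc, hx, hfc, pvMrec, h5]
        | some c =>
          have hany := pvFc_take_any rest c hfc 5
          unfold pvFlush
          rw [hfc, show pvFc (x :: rest) = some (c + 1) from by simp [pvFc, hx, hfc]]
          simp only [Nat.sub_zero, pvMrec, hx, Bool.false_eq_true, if_false, lt_irrefl,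
            decide_false, Bool.false_or, hany, Nat.sub_zero]
          rw [pvLastN_append buf x c]
          simp only [List.append_assoc]
          congr 1
          by_cases hc5 : c < 5 <;> simp [hc5]


theorem pvWindow_iff (l : List String) (i : Nat) :
    pvWindow l i = true ↔
      ∃ c, c < l.length ∧ pvIsChange (l.getD c "") = true ∧ i ≤ c + 5 ∧ c ≤ i + 5 := by
  unfold pvWindow
  simp only [List.any_eq_true, List.mem_range'_1]
  constructor
  · rintro ⟨j, ⟨hj1, hj2⟩, hchg⟩
    have hjlt : j < l.length := by omega
    rw [show (l.map pvIsChange).getD j false = pvIsChange (l.getD j "") by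
      simp [List.getD_eq_getElem?_getD, hjlt]] at hchg
    exact ⟨j, hjlt, hchg, by omega, by omega⟩
  · rintro ⟨c, hc, hchg, h1, h2⟩
    refine ⟨c, ⟨by omega, by omega⟩, ?_⟩
    rw [show (l.map pvIsChange).getD c false = pvIsChange (l.getD c "") by
      simp [List.getD_eq_getElem?_getD, hc]]
    exact hchg


theorem pvAny_take_iff (l : List String) (k : Nat) :
    (l.take k).any pvIsChange = true ↔
      ∃ j, j < k ∧ j < l.length ∧ pvIsChange (l.getD j "") = true := by
  induction l generalizing k with
  | nil => simp
  | cons x r ih =>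
    cases k with
    | zero => simp
    | succ k =>
      simp only [List.take_succ_cons, List.any_cons, Bool.or_eq_true, ih k]
      constructor
      · rintro (hx | ⟨j, hj1, hj2, hj3⟩)
        · exact ⟨0, by omega, by simp, by simpa using hx⟩
        · exact ⟨j + 1, by omega, by simpa using hj2, by simpa using hj3⟩
      · rintro ⟨j, hj1, hj2, hj3⟩
        cases j with
        | zero => exact Or.inl (by simpa using hj3)
        | succ j => exact Or.inr ⟨j, by omega, by simpa using hj2, by simpa using hj3⟩


theorem pvKeep_succ (x : String) (rest : List String) (t i : Nat) (ht : t ≤ 5) :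
    pvKeep (x :: rest) t (i + 1) = pvKeep rest (if pvIsChange x then 5 else t - 1) i := by
  apply Bool.coe_iff_coe.mp
  unfold pvKeep
  simp only [Bool.or_eq_true, decide_eq_true_iff, pvWindow_iff]
  by_cases hx : pvIsChange x = true <;> simp only [hx, if_pos, if_neg, Bool.not_eq_true]
  · constructor
    · rintro (hlt | ⟨c, hc, hchg, h1, h2⟩)
      · exact Or.inl (by omega)
      · cases c with
        | zero => exact Or.inl (by omega)
        | succ c =>
          exact Or.inr ⟨c, by simpa using hc, by simpa using hchg, by omega, by omega⟩
    · rintro (hlt | ⟨c, hc, hchg, h1, h2⟩)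
      · exact Or.inr ⟨0, by simp, by simpa using hx, by omega, by omega⟩
      · exact Or.inr ⟨c + 1, by simpa using hc, by simpa using hchg, by omega, by omega⟩
  · simp only [Bool.not_eq_true] at hx
    constructor
    · rintro (hlt | ⟨c, hc, hchg, h1, h2⟩)
      · exact Or.inl (by omega)
      · cases c with
        | zero => simp [hx] at hchg
        | succ c =>
          exact Or.inr ⟨c, by simpa using hc, by simpa using hchg, by omega, by omega⟩
    · rintro (hlt | ⟨c, hc, hchg, h1, h2⟩)
      · exact Or.inl (by omega)
      · exact Or.inr ⟨c + 1, by simpa using hc, by simpa using hchg, by omega, by omega⟩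


theorem pvKeep_zero_change (x : String) (rest : List String) (t : Nat)
    (hx : pvIsChange x = true) : pvKeep (x :: rest) t 0 = true := by
  unfold pvKeep
  have : pvWindow (x :: rest) 0 = true :=
    (pvWindow_iff _ _).mpr ⟨0, by simp, by simpa using hx, by omega, by omega⟩
  simp [this]


theorem pvKeep_zero_nonchange (x : String) (rest : List String) (t : Nat)
    (hx : pvIsChange x = false) :
    pvKeep (x :: rest) t 0 = (decide (0 < t) || (rest.take 5).any pvIsChange) := by
  apply Bool.coe_iff_coe.mp
  unfold pvKeep
  simp only [Bool.or_eq_true, decide_eq_true_iff, pvWindow_iff, pvAny_take_iff]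
  constructor
  · rintro (hlt | ⟨c, hc, hchg, h1, h2⟩)
    · exact Or.inl hlt
    · cases c with
      | zero => simp [hx] at hchg
      | succ c =>
        exact Or.inr ⟨c, by omega, by simpa using hc, by simpa using hchg⟩
  · rintro (hlt | ⟨j, hj1, hj2, hj3⟩)
    · exact Or.inl hlt
    · exact Or.inr ⟨j + 1, by simpa using hj2, by simpa using hj3, by omega, by omega⟩


theorem pvMfil_eq (l : List String) (t : Nat) (ht : t ≤ 5) : pvMfil l t = pvMrec t l := by
  induction l generalizing t with
  | nil => simp [pvMfil, pvMrec]
  | cons x rest ih =>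
    unfold pvMfil
    rw [show (x :: rest).length = rest.length + 1 from rfl, List.range_succ_eq_map,
      List.filter_cons]
    have hshift : (fun i => pvKeep (x :: rest) t (Nat.succ i)) =
        fun i => pvKeep rest (if pvIsChange x then 5 else t - 1) i :=
      funext fun i => pvKeep_succ x rest t i ht
    by_cases hx : pvIsChange x = true
    · rw [if_pos (by simpa using pvKeep_zero_change x rest t hx)]
      simp only [List.filter_map, Function.comp_def, hshift, hx, if_pos, List.map_cons,
        List.map_map, List.getD_cons_zero]
      simp only [Nat.succ_eq_add_one, List.getD_cons_succ]
      rw [show pvMrec t (x :: rest) = x :: pvMrec 5 rest from by simp [pvMrec, hx]]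
      rw [← ih 5 (by omega)]
      rfl
    · simp only [Bool.not_eq_true] at hx
      rw [pvKeep_zero_nonchange x rest t hx]
      simp only [List.filter_map, Function.comp_def, hshift, hx, Bool.false_eq_true, if_false]
      rw [show pvMrec t (x :: rest) =
          (if 0 < t || (rest.take 5).any pvIsChange then [x] else []) ++ pvMrec (t - 1) rest
        from by simp [pvMrec, hx]]
      rw [← ih (t - 1) (by omega)]
      by_cases hcond : (decide (0 < t) || (rest.take 5).any pvIsChange) = true
      · rw [if_pos hcond, if_pos (by simpa using hcond)]
        simp only [List.map_cons, List.getD_cons_zero, List.map_map, Function.comp_def,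
          Nat.succ_eq_add_one, List.getD_cons_succ]
        rfl
      · rw [if_neg hcond, if_neg (by simpa using hcond)]
        simp only [List.map_map, Function.comp_def, Nat.succ_eq_add_one, List.getD_cons_succ]
        rfl


theorem pvAlt_eq_Mfil (patch : List String) : get_condensed_patch_py_alt patch = pvMfil patch 0 := by
  unfold get_condensed_patch_py_alt pvMfil
  simp only []
  congr 1
  apply List.filter_congr
  intro i hi
  have hin : i < patch.length := by simpa using hi
  rw [PySem.List.getD_map_range _ _ _ _ hin]
  simp [pvKeep, pvWindow]


-- ===== VERDICT (by name: the statement is the Claim_ definition above) =====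
theorem get_condensed_patch_py_spec : Claim_equal_get_condensed_patch_py := by
  intro patch _
  show get_condensed_patch_py patch = get_condensed_patch_py_alt patch
  rw [get_condensed_patch_py, pvFoldl_emit, show (0 : Int) = ((0 : Nat) : Int) from rfl,
    pvEmit_eq patch [] 0 (by omega) (by simp), pvFlush_nil, pvAlt_eq_Mfil,
    pvMfil_eq patch 0 (by omega)]
  simp
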